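-- pv_equiv track=rewrite | github.com/AkashKumarSingh11032001/CodeBeyond | CriticalThinking/#3_GIFTS.py | find_youngest_member
-- ===== SOURCE A (Python) =====
-- def find_youngest_member(n, m, gifts):
--     tempDect = {}
--
--     # If no gifts were exchanged, return n (all members are eligible)
--     if len(gifts) <= 0:
--         return n
--
--     # Count the number of gifts received by each member
--     for i in range(m):
--         if gifts[i][1] in tempDect:
--             tempDect[gifts[i][1]] += 1
--         else:
--             tempDect[gifts[i][1]] = 1
--
--     # Check if any member received gifts from all others
--     for k, v in tempDect.items():
--         if v == m:
--             return k
--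
--     # If no such member is found, return -1
--     return -1
-- ===== SOURCE B (Python) =====
-- def find_youngest_member(n, m, gifts):
--     # If no gifts were exchanged, return n (all members are eligible)
--     if len(gifts) <= 0:
--         return n
--     # All m counted gifts went to one member iff there is exactly one recipient
--     recipients = {gifts[i][1] for i in range(m)}
--     if len(recipients) == 1:
--         return next(iter(recipients))
--     return -1
-- ===== Notes on version B (the rewrite author's own statement) =====
-- stated objective: simpler
-- what changed: B drops both the per-member counting dictionary and the threshold scan over its items: since exactly m gifts are counted, some member received m gifts iff all m gifts went to the same recipient, so B just builds the set of recipients and returns its sole element when it is a singleton, -1 otherwise.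
import Mathlib
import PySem

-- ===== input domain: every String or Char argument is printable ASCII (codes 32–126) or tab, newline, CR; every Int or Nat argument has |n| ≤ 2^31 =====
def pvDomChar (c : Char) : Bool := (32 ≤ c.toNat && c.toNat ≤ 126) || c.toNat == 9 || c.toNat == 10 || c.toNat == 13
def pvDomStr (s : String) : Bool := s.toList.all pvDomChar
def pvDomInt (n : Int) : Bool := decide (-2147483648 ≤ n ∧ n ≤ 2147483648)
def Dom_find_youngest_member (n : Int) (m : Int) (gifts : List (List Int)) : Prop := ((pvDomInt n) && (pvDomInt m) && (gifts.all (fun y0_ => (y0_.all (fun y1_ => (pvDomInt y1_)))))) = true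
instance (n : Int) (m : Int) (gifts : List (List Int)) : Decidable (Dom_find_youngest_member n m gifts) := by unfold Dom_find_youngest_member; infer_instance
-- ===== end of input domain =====

-- B replaces A's per-member counting dictionary and threshold scan by a single
-- set of recipients: all m gifts went to one member iff the set is a singleton. (objective: simpler)

-- ===== PORT A =====
-- gifts[i][1] (total form; exact under Pre_, which keeps the indexing in range)
def pvKey (gifts : List (List Int)) (i : Int) : Int :=
  (PySem.List.pyGet? ((PySem.List.pyGet? gifts i).getD []) 1).getD 0

-- the second for-loop of A: first key whose count v equals m, else -1
def pvScan (items : List (Int × Int)) (m : Int) : Int :=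
  match items with
  | [] => -1
  | (k, v) :: rest => if v = m then k else pvScan rest m

def find_youngest_member (n : Int) (m : Int) (gifts : List (List Int)) : Int :=
  if (gifts.length : Int) ≤ 0 then n
  else
    let d : PySem.Dict Int Int :=
      (PySem.List.pyRange 0 m 1).foldl
        (fun d i =>
          let k := pvKey gifts i
          if d.contains k then d.insert k (d.getD k 0 + 1) else d.insert k 1)
        PySem.Dict.empty
    pvScan d.items m

-- ===== PORT B =====
def find_youngest_member_alt (n : Int) (m : Int) (gifts : List (List Int)) : Int :=
  if (gifts.length : Int) ≤ 0 then n
  else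
    let recipients : PySem.Set Int :=
      PySem.Set.ofList ((PySem.List.pyRange 0 m 1).map (pvKey gifts))
    match recipients with
    | [k] => k
    | _ => -1

-- ===== PRECONDITION & SPEC =====
-- Pre_ excludes exactly the inputs on which the Python A raises IndexError:
-- a non-empty gifts list with m exceeding len(gifts) or some visited row shorter than 2.
def Pre_find_youngest_member (n : Int) (m : Int) (gifts : List (List Int)) : Prop :=
  gifts = [] ∨ (m ≤ (gifts.length : Int) ∧ ∀ l ∈ gifts.take m.toNat, 2 ≤ l.length)
instance (n : Int) (m : Int) (gifts : List (List Int)) : Decidable (Pre_find_youngest_member n m gifts) := by unfold Pre_find_youngest_member; infer_instance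

def pvWitness_find_youngest_member : Int × Int × List (List Int) := (3, 2, [[0, 1], [2, 1]])

def Spec_find_youngest_member (n : Int) (m : Int) (gifts : List (List Int)) (out : Int) : Prop := out = find_youngest_member_alt n m gifts
instance (n : Int) (m : Int) (gifts : List (List Int)) (out : Int) : Decidable (Spec_find_youngest_member n m gifts out) := by unfold Spec_find_youngest_member; infer_instance

-- ===== CLAIM (what is proved, stated in full; the proofs are below) =====
def Claim_equal_find_youngest_member : Prop := ∀ (n : Int) (m : Int) (gifts : List (List Int)), Dom_find_youngest_member n m gifts → Pre_find_youngest_member n m gifts → Spec_find_youngest_member n m gifts (find_youngest_member n m gifts)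

-- ===== LEMMAS AND PROOFS =====

-- A's counting loop builds exactly Counter(keys)
theorem pvFold_eq_counter (gifts : List (List Int)) (m : Int) :
    (PySem.List.pyRange 0 m 1).foldl
      (fun d i =>
        let k := pvKey gifts i
        if d.contains k then d.insert k (d.getD k 0 + 1) else d.insert k 1)
      PySem.Dict.empty
    = PySem.Dict.counter ((PySem.List.pyRange 0 m 1).map (pvKey gifts)) := by
  rw [← PySem.Dict.foldl_insert_getD_add_one_eq_counter, List.foldl_map]
  congr 1
  funext d i
  by_cases h : d.contains (pvKey gifts i)
  · simp [h]
  · have h0 : d.getD (pvKey gifts i) 0 = 0 :=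
      PySem.Dict.getD_of_not_contains d 0 (by simpa using h)
    simp [h, h0]

theorem pvScan_eq_neg_one (items : List (Int × Int)) (m : Int)
    (h : ∀ p ∈ items, p.2 ≠ m) : pvScan items m = -1 := by
  induction items with
  | nil => rfl
  | cons p rest ih =>
    obtain ⟨k, v⟩ := p
    have hv : v ≠ m := h (k, v) (by simp)
    simp [pvScan, hv]
    exact ih fun q hq => h q (by simp [hq])

theorem find_youngest_member_spec : Claim_equal_find_youngest_member := by
  intro n m gifts _ _
  unfold Spec_find_youngest_member find_youngest_member find_youngest_member_alt
  by_cases hg : (gifts.length : Int) ≤ 0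
  · have hnil : gifts = [] := by
      cases gifts with
      | nil => rfl
      | cons a t => exfalso; simp at hg; omega
    simp [hnil]
  · simp only [hg, if_false]
    rw [pvFold_eq_counter]
    set ks : List Int := (PySem.List.pyRange 0 m 1).map (pvKey gifts) with hks
    rw [PySem.Dict.items_counter]
    have hlen : ks.length = m.toNat := by
      simp [hks, PySem.List.length_pyRange_one]
    have hmem : ∀ x, x ∈ PySem.Set.ofList ks → x ∈ ks := by
      intro x hx; exact (PySem.Set.mem_ofList ks x).mp hx
    have hnd : (PySem.Set.ofList ks).Nodup := PySem.Set.nodup_ofList ks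
    match hcase : PySem.Set.ofList ks with
    | [] => simp [pvScan]
    | [k] =>
      -- every element of ks equals k, so count k = length = m
      have hkmem : k ∈ ks := hmem k (by rw [hcase]; simp)
      have hkspos : ks ≠ [] := by intro h; rw [h] at hkmem; simp at hkmem
      have hall : ∀ x ∈ ks, x = k := by
        intro x hx
        have : x ∈ PySem.Set.ofList ks := (PySem.Set.mem_ofList ks x).mpr hx
        rw [hcase] at this; simpa using this
      have hcount : ks.count k = ks.length := by
        rw [List.count_eq_length]
        intro b hb; exact (hall b hb).symm
      have hmpos : 0 < m := by
        by_contra hmle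
        have : m.toNat = 0 := by omega
        have : ks = [] := List.eq_nil_of_length_eq_zero (by rw [hlen, this])
        exact hkspos this
      have hvm : (ks.count k : Int) = m := by
        rw [hcount, hlen]; omega
      simp [pvScan, hvm]
    | k1 :: k2 :: rest =>
      -- at least two distinct recipients: no count reaches m
      rw [hcase] at hnd hmem
      have hne : k1 ≠ k2 := by
        intro h; rw [h] at hnd; simp at hnd
      have h1 : k1 ∈ ks := hmem k1 (by simp)
      have h2 : k2 ∈ ks := hmem k2 (by simp)
      have hres : pvScan ((k1 :: k2 :: rest).map (fun k => (k, (ks.count k : Int)))) m = -1 := by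
        apply pvScan_eq_neg_one
        intro p hp
        simp only [List.mem_map] at hp
        obtain ⟨k, hk, rfl⟩ := hp
        simp only [ne_eq]
        intro hvm
        have hkm : k ∈ ks := hmem k hk
        have hcount : ks.count k = ks.length := by
          have hmpos : 0 < m := by
            rcases List.length_pos_iff.mpr (List.ne_nil_of_mem hkm) with hp
            omega
          omega
        have hall := List.count_eq_length.mp hcount
        have e1 : k = k1 := hall k1 h1
        have e2 : k = k2 := hall k2 h2
        exact hne (e1 ▸ e2)
      exact hres.symm ▸ hres
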